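-- pv_equiv track=rewrite | github.com/educacaocriativa/editor_ia | word/planilha_reader.py | formatar_habilidades_para_prompt
-- ===== SOURCE A (Python) =====
-- from typing import Dict, List, Optional
--
-- def formatar_habilidades_para_prompt(habilidades: Dict[str, dict], max_chars: int = 6000) -> str:
--     """
--     Formata o dicionário de habilidades para inclusão num prompt.
--     Respeita o limite de caracteres truncando se necessário.
--     """
--     if not habilidades:
--         return "(nenhuma habilidade carregada)"
--     linhas = []
--     total = 0
--     for codigo, dados in sorted(habilidades.items()):
--         linha = f"- {codigo}: {dados.get('habilidade', '')} [{dados.get('componente', '')} / {dados.get('ano', '')}]"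
--         total += len(linha)
--         if total > max_chars:
--             linhas.append(f"... (+{len(habilidades) - len(linhas)} habilidades omitidas por limite de espaço)")
--             break
--         linhas.append(linha)
--     return "\n".join(linhas)
-- ===== SOURCE B (Python) =====
-- from itertools import accumulate
--
--
-- def formatar_habilidades_para_prompt(habilidades, max_chars=6000):
--     if not habilidades:
--         return "(nenhuma habilidade carregada)"
--     lines = [
--         f"- {c}: {d.get('habilidade', '')} [{d.get('componente', '')} / {d.get('ano', '')}]"
--         for c, d in sorted(habilidades.items())
--     ]
--     totals = list(accumulate(len(l) for l in lines))
--     k = sum(1 for t in totals if t <= max_chars)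
--     if k == len(lines):
--         return "\n".join(lines)
--     return "\n".join(
--         lines[:k]
--         + [f"... (+{len(habilidades) - k} habilidades omitidas por limite de espaço)"]
--     )
-- ===== Notes on version B (the rewrite author's own statement) =====
-- stated objective: alternative
-- what changed: A interleaves formatting, a running character total and an early-break inside one loop; B first builds the full list of formatted lines, computes cumulative length totals (itertools.accumulate), derives the cut index as the count of totals within the limit, and assembles the output from lines[:k] plus the omission line.
import Mathlib
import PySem

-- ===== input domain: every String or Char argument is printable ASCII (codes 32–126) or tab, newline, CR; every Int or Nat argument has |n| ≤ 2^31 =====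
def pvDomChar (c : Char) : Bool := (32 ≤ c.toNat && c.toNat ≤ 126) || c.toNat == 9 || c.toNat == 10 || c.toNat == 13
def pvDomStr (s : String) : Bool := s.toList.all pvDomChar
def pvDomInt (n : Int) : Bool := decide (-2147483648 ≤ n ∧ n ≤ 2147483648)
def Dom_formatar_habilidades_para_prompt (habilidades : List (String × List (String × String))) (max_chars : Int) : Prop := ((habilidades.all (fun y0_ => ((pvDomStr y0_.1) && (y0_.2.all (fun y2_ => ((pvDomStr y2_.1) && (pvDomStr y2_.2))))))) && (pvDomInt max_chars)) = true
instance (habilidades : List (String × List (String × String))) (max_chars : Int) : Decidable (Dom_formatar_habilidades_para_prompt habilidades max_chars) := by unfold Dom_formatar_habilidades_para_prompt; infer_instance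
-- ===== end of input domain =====

-- B replaces A's single accumulating break-loop by a build-all-lines / cumulative-totals / cut-index decomposition (objective: simpler decomposition, same cost).

-- shared helpers (the same f-string and sentinel strings both Pythons contain verbatim)
def pvLinha (p : String × List (String × String)) : String :=
  "- " ++ p.1 ++ ": " ++ (PySem.Dict.mk p.2).getD "habilidade" "" ++ " [" ++
    (PySem.Dict.mk p.2).getD "componente" "" ++ " / " ++ (PySem.Dict.mk p.2).getD "ano" "" ++ "]"

def pvOmit (n : Int) : String :=
  "... (+" ++ PySem.Int.toStr n ++ " habilidades omitidas por limite de espaço)"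

-- ===== PORT A =====
-- A's for-loop over sorted items with running total, early break appending the omission line
def pvLoopA (max_chars : Int) (n : Int) :
    List (String × List (String × String)) → List String → Int → List String
  | [], linhas, _ => linhas
  | p :: rest, linhas, total =>
    let linha := pvLinha p
    let total' := total + PySem.Str.len linha
    if total' > max_chars then
      linhas ++ [pvOmit (n - (linhas.length : Int))]
    else
      pvLoopA max_chars n rest (linhas ++ [linha]) total'

def formatar_habilidades_para_prompt (habilidades : List (String × List (String × String))) (max_chars : Int) : String :=
  if habilidades = [] then "(nenhuma habilidade carregada)"
  else
    PySem.Str.join "\n"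
      (pvLoopA max_chars (habilidades.length : Int)
        (PySem.List.sorted habilidades (fun p => p.1) false) [] 0)

-- ===== PORT B =====
-- itertools.accumulate over the line lengths
def pvAccum (t : Int) : List Int → List Int
  | [] => []
  | x :: xs => (t + x) :: pvAccum (t + x) xs

def formatar_habilidades_para_prompt_alt (habilidades : List (String × List (String × String))) (max_chars : Int) : String :=
  if habilidades = [] then "(nenhuma habilidade carregada)"
  else
    let lines := (PySem.List.sorted habilidades (fun p => p.1) false).map pvLinha
    let totals := pvAccum 0 (lines.map PySem.Str.len)
    let k := totals.countP (fun t => t ≤ max_chars)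
    if k = lines.length then PySem.Str.join "\n" lines
    else
      PySem.Str.join "\n"
        (lines.take k ++ [pvOmit ((habilidades.length : Int) - (k : Int))])

-- ===== PRECONDITION & SPEC =====
def Spec_formatar_habilidades_para_prompt (habilidades : List (String × List (String × String))) (max_chars : Int) (out : String) : Prop := out = formatar_habilidades_para_prompt_alt habilidades max_chars
instance (habilidades : List (String × List (String × String))) (max_chars : Int) (out : String) : Decidable (Spec_formatar_habilidades_para_prompt habilidades max_chars out) := by unfold Spec_formatar_habilidades_para_prompt; infer_instance

-- ===== CLAIM (what is proved, stated in full; the proofs are below) =====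
def Claim_equal_formatar_habilidades_para_prompt : Prop := ∀ (habilidades : List (String × List (String × String))) (max_chars : Int), Dom_formatar_habilidades_para_prompt habilidades max_chars → Spec_formatar_habilidades_para_prompt habilidades max_chars (formatar_habilidades_para_prompt habilidades max_chars)

-- ===== LEMMAS AND PROOFS =====

-- every cumulative total is at least the starting total (line lengths are nonnegative)
lemma pvAccum_ge (t : Int) (ls : List Int) (h : ∀ y ∈ ls, 0 ≤ y) :
    ∀ x ∈ pvAccum t ls, t ≤ x := by
  induction ls generalizing t with
  | nil => simp [pvAccum]
  | cons a as ih =>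
    intro x hx
    simp only [pvAccum, List.mem_cons] at hx
    have ha : 0 ≤ a := h a (by simp)
    rcases hx with rfl | hx
    · omega
    · have := ih (t + a) (fun y hy => h y (by simp [hy])) x hx
      omega

lemma pvLoopA_eq (mc n : Int) (items : List (String × List (String × String))) :
    ∀ (linhas : List String) (total : Int),
    pvLoopA mc n items linhas total =
      (let lines := items.map pvLinha
       let totals := pvAccum total (lines.map PySem.Str.len)
       let k := totals.countP (fun t => t ≤ mc)
       if k = lines.length then linhas ++ lines
       else linhas ++ lines.take k ++ [pvOmit (n - ((linhas.length : Int) + (k : Int)))]) := by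
  induction items with
  | nil => intro linhas total; simp [pvLoopA, pvAccum]
  | cons p rest ih =>
    intro linhas total
    simp only [pvLoopA, List.map_cons, pvAccum, List.countP_cons, decide_eq_true_eq,
      List.length_cons]
    by_cases hbr : total + PySem.Str.len (pvLinha p) > mc
    · -- break: every later cumulative total also exceeds max_chars, so countP = 0
      have hcnt : (pvAccum (total + PySem.Str.len (pvLinha p))
          ((rest.map pvLinha).map PySem.Str.len)).countP (fun t => decide (t ≤ mc)) = 0 := by
        rw [List.countP_eq_zero]
        intro x hx
        have h0 : ∀ y ∈ (rest.map pvLinha).map PySem.Str.len, 0 ≤ y := by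
          intro y hy
          simp only [List.mem_map] at hy
          obtain ⟨s, _, rfl⟩ := hy
          simp [PySem.Str.len_eq]
        have := pvAccum_ge _ _ h0 x hx
        simp only [decide_eq_true_eq]
        omega
      rw [if_pos hbr, hcnt, if_neg (by omega : ¬ total + PySem.Str.len (pvLinha p) ≤ mc),
        if_neg (by omega : ¬ ((0:Nat) + 0) = (rest.map pvLinha).length + 1)]
      simp
    · rw [not_lt] at hbr
      rw [if_neg (by omega), ih (linhas ++ [pvLinha p]) (total + PySem.Str.len (pvLinha p)),
        if_pos hbr]
      set k' := (pvAccum (total + PySem.Str.len (pvLinha p))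
          ((rest.map pvLinha).map PySem.Str.len)).countP (fun t => decide (t ≤ mc)) with hk'
      by_cases hfull : k' = (rest.map pvLinha).length
      · rw [if_pos hfull, if_pos (by omega)]
        simp
      · rw [if_neg hfull, if_neg (by omega), List.take_succ_cons]
        have hc : (n - (((linhas ++ [pvLinha p]).length : Int) + (k' : Int)))
            = n - ((linhas.length : Int) + ((k' + 1 : Nat) : Int)) := by
          simp only [List.length_append, List.length_cons, List.length_nil]
          push_cast
          ring
        rw [hc]
        simp only [List.append_assoc, List.cons_append, List.nil_append, ← hk']

-- ===== VERDICT (by name: the statement is the Claim_ definition above) =====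
theorem formatar_habilidades_para_prompt_spec : Claim_equal_formatar_habilidades_para_prompt := by
  intro habilidades max_chars _
  unfold Spec_formatar_habilidades_para_prompt
  unfold formatar_habilidades_para_prompt formatar_habilidades_para_prompt_alt
  by_cases h : habilidades = []
  · simp [h]
  · rw [if_neg h, if_neg h]
    rw [pvLoopA_eq]
    simp only [List.length_nil, List.nil_append, Nat.cast_zero, zero_add]
    split <;> rfl
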